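-- pv_equiv track=rewrite | github.com/jalddak/ps_training | python/programmers/level 1/!! 숫자 짝꿍.py | solution
-- ===== SOURCE A (Python) =====
-- def solution(X, Y):
--     answer = ''
--     X_dict = {}
--     for num in X:
--         if num not in X_dict:
--             X_dict[num] = 1
--         else:
--             X_dict[num] += 1
--     Y_dict = {}
--     for num in Y:
--         if num not in Y_dict:
--             Y_dict[num] = 1
--         else:
--             Y_dict[num] += 1
--
--     intersection = list(set(list(X_dict.keys())) & set(list(Y_dict.keys())))
--     intersection.sort(reverse=True)
--
--     for num in intersection:
--         X_cnt = X_dict[num]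
--         Y_cnt = Y_dict[num]
--         cnt = 0
--         if X_cnt < Y_cnt:
--             cnt = X_cnt
--         else:
--             cnt = Y_cnt
--         for _ in range(cnt):
--             answer += num
--
--     if len(answer) == 0:
--         return '-1'
--     if len(answer) == answer.count('0'):
--         return '0'
--     return answer
-- ===== SOURCE B (Python) =====
-- def solution(X, Y):
--     xs = sorted(X, reverse=True)
--     ys = sorted(Y, reverse=True)
--     common = []
--     i = j = 0
--     while i < len(xs) and j < len(ys):
--         if xs[i] == ys[j]:
--             common.append(xs[i])
--             i += 1
--             j += 1
--         elif xs[i] > ys[j]: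
--             i += 1
--         else:
--             j += 1
--     answer = ''.join(common)
--     if not answer:
--         return '-1'
--     if answer.count('0') == len(answer):
--         return '0'
--     return answer
-- ===== Notes on version B (the rewrite author's own statement) =====
-- stated objective: alternative
-- what changed: Replaces the two frequency dicts, the set intersection and the per-key min loop with sorting both strings in descending order and a two-pointer merge that collects the common characters, which already come out in descending order.
import Mathlib
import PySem

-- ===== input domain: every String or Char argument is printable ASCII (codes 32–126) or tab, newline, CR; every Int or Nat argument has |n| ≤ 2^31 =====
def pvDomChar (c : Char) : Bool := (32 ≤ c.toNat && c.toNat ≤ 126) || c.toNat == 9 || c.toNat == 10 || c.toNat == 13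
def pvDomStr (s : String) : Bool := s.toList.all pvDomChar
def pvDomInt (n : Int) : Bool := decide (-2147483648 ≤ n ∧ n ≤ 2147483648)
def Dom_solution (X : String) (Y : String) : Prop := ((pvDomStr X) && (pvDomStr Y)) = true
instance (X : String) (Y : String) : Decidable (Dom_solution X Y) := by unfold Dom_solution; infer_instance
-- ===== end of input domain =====

-- B replaces A's frequency dicts + set intersection + per-key min loop by sorting both
-- strings descending and merging them with two pointers, collecting the common characters.

-- ===== PORT A =====
def solution (X : String) (Y : String) : String :=
  let X_dict := List.foldl
    (fun d num => if d.contains num then d.modify num 0 (· + 1) else d.insert num 1)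
    PySem.Dict.empty X.toList
  let Y_dict := List.foldl
    (fun d num => if d.contains num then d.modify num 0 (· + 1) else d.insert num 1)
    PySem.Dict.empty Y.toList
  -- set(X_dict.keys()) & set(Y_dict.keys()), then .sort(reverse=True); the pre-sort set
  -- iteration order is irrelevant because the elements are distinct and sorted right after
  let intersection := PySem.List.sorted
    ((PySem.Set.ofList X_dict.keys).inter (PySem.Set.ofList Y_dict.keys)) id true
  let answer := intersection.foldl (fun a num =>
      -- X_dict[num] / Y_dict[num]: num is a key of both dicts here, so getD is exact (default unreachable)
      let X_cnt := X_dict.getD num 0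
      let Y_cnt := Y_dict.getD num 0
      let cnt := if X_cnt < Y_cnt then X_cnt else Y_cnt
      (PySem.List.pyRange 0 cnt 1).foldl (fun a _ => a ++ [num]) a)
    ([] : List Char)
  if answer.length = 0 then "-1"
  else if answer.length = answer.count '0' then "0"
  else String.ofList answer

-- ===== PORT B =====
-- B's while loop over indices i, j, transcribed as the obvious structural recursion on
-- the two remaining suffixes (the loop stops when either list is exhausted)
def mergeCommon : List Char → List Char → List Char
  | [], _ => []
  | _ :: _, [] => []
  | a :: xs, b :: ys =>
    if a = b then a :: mergeCommon xs ys
    else if b < a then mergeCommon xs (b :: ys)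
    else mergeCommon (a :: xs) ys
termination_by xs ys => xs.length + ys.length

def solution_alt (X : String) (Y : String) : String :=
  let xs := PySem.List.sorted X.toList id true
  let ys := PySem.List.sorted Y.toList id true
  let answer := mergeCommon xs ys
  if answer = [] then "-1"
  else if answer.count '0' = answer.length then "0"
  else String.ofList answer

-- ===== PRECONDITION & SPEC =====
def Spec_solution (X : String) (Y : String) (out : String) : Prop := out = solution_alt X Y
instance (X : String) (Y : String) (out : String) : Decidable (Spec_solution X Y out) := by unfold Spec_solution; infer_instance

-- ===== CLAIM =====
def Claim_equal_solution : Prop := ∀ (X : String) (Y : String), Dom_solution X Y → Spec_solution X Y (solution X Y)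

-- ===== LEMMAS AND PROOFS =====

-- A's counting loop body is exactly Dict.modify (insert of 1 when absent = modify with default 0)
lemma stepA_eq (d : PySem.Dict Char Int) (c : Char) :
    (if d.contains c then d.modify c 0 (· + 1) else d.insert c 1) = d.modify c 0 (· + 1) := by
  by_cases h : d.contains c = true
  · simp [h]
  · simp only [Bool.not_eq_true] at h
    simp [h, PySem.Dict.modify, PySem.Dict.getD,
      (PySem.Dict.get?_eq_none_iff_contains d c).mpr h]

lemma dictA_eq (xs : List Char) :
    List.foldl (fun d num => if d.contains num then d.modify num 0 (· + 1) else d.insert num 1)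
      PySem.Dict.empty xs = PySem.Dict.counter xs := by
  unfold PySem.Dict.counter
  congr 1
  funext d c
  exact stepA_eq d c

lemma flatMap_const_singleton {α : Type} (c : Char) (l : List α) :
    l.flatMap (fun _ => [c]) = List.replicate l.length c := by
  induction l with
  | nil => rfl
  | cons x xs ih => simp [List.flatMap_cons, ih, List.replicate_succ]

-- A's inner 'for _ in range(cnt): answer += num' appends cnt copies
lemma inner_eq (c : Char) (n : Int) :
    (PySem.List.pyRange 0 n 1).flatMap (fun _ => [c]) = List.replicate n.toNat c := by
  rw [flatMap_const_singleton, PySem.List.length_pyRange_one, sub_zero]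

lemma toNat_if_min (a b : Nat) :
    (if (a : Int) < (b : Int) then (a : Int) else (b : Int)).toNat = min a b := by
  split_ifs with h <;> omega

-- count of one char in a flatMap of replicates over a nodup char list
lemma count_flatMap_replicate (g : Char → Nat) (L : List Char) (hnd : L.Nodup) (c : Char) :
    (L.flatMap (fun a => List.replicate (g a) a)).count c = if c ∈ L then g c else 0 := by
  induction L with
  | nil => simp
  | cons a L ih =>
    simp only [List.nodup_cons] at hnd
    rw [List.flatMap_cons, List.count_append, List.count_replicate, ih hnd.2]
    by_cases hca : c = a
    · subst hca
      simp [hnd.1]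
    · simp [hca, Ne.symm hca]

-- a flatMap of replicates over a strictly descending char list is descending
lemma pairwise_flatMap_replicate (g : Char → Nat) (L : List Char)
    (hp : L.Pairwise (fun a b => b < a)) :
    (L.flatMap (fun a => List.replicate (g a) a)).Pairwise (fun a b : Char => b ≤ a) := by
  induction L with
  | nil => simp
  | cons a L ih =>
    rw [List.pairwise_cons] at hp
    rw [List.flatMap_cons]
    refine List.pairwise_append.mpr ⟨?_, ih hp.2, ?_⟩
    · exact List.pairwise_replicate.mpr (Or.inr le_rfl)
    · intro x hx y hy
      rcases List.mem_flatMap.mp hy with ⟨b, hbL, hyb⟩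
      rw [List.eq_of_mem_replicate hx, List.eq_of_mem_replicate hyb]
      exact le_of_lt (hp.1 b hbL)

-- mergeCommon only produces elements of its left (resp. right) input
lemma mem_mergeCommon : ∀ (xs ys : List Char) (c : Char),
    c ∈ mergeCommon xs ys → c ∈ xs ∧ c ∈ ys := by
  intro xs ys
  induction xs, ys using mergeCommon.induct with
  | case1 ys => simp [mergeCommon]
  | case2 a xs => simp [mergeCommon]
  | case3 xs b ys ih =>
    intro c hc
    rw [mergeCommon, if_pos rfl] at hc
    rcases List.mem_cons.mp hc with h | h
    · subst h; exact ⟨List.mem_cons_self, List.mem_cons_self⟩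
    · rcases ih c h with ⟨h1, h2⟩
      exact ⟨List.mem_cons_of_mem _ h1, List.mem_cons_of_mem _ h2⟩
  | case4 a xs b ys hab hba ih =>
    intro c hc
    rw [mergeCommon, if_neg hab, if_pos hba] at hc
    rcases ih c hc with ⟨h1, h2⟩
    exact ⟨List.mem_cons_of_mem _ h1, h2⟩
  | case5 a xs b ys hab hba ih =>
    intro c hc
    rw [mergeCommon, if_neg hab, if_neg hba] at hc
    rcases ih c hc with ⟨h1, h2⟩
    exact ⟨h1, List.mem_cons_of_mem _ h2⟩

-- on descending inputs, the merge result is descending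
lemma pairwise_mergeCommon : ∀ (xs ys : List Char),
    xs.Pairwise (fun a b => b ≤ a) → ys.Pairwise (fun a b => b ≤ a) →
    (mergeCommon xs ys).Pairwise (fun a b : Char => b ≤ a) := by
  intro xs ys
  induction xs, ys using mergeCommon.induct with
  | case1 ys => intro _ _; simp [mergeCommon]
  | case2 a xs => intro _ _; simp [mergeCommon]
  | case3 xs b ys ih =>
    intro hx hy
    rw [List.pairwise_cons] at hx hy
    rw [mergeCommon, if_pos rfl, List.pairwise_cons]
    refine ⟨?_, ih hx.2 hy.2⟩
    intro y hy'
    exact hx.1 y (mem_mergeCommon xs ys y hy').1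
  | case4 a xs b ys hab hba ih =>
    intro hx hy
    rw [mergeCommon, if_neg hab, if_pos hba]
    exact ih (List.Pairwise.of_cons hx) hy
  | case5 a xs b ys hab hba ih =>
    intro hx hy
    rw [mergeCommon, if_neg hab, if_neg hba]
    exact ih hx (List.Pairwise.of_cons hy)

-- on descending inputs, the merge result has the pointwise-min multiset
lemma count_mergeCommon : ∀ (xs ys : List Char),
    xs.Pairwise (fun a b => b ≤ a) → ys.Pairwise (fun a b => b ≤ a) → ∀ c : Char,
    (mergeCommon xs ys).count c = min (xs.count c) (ys.count c) := by
  intro xs ys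
  induction xs, ys using mergeCommon.induct with
  | case1 ys => intro _ _ c; simp [mergeCommon]
  | case2 a xs => intro _ _ c; simp [mergeCommon]
  | case3 xs b ys ih =>
    intro hx hy c
    rw [mergeCommon, if_pos rfl]
    simp only [List.count_cons]
    rw [ih (List.Pairwise.of_cons hx) (List.Pairwise.of_cons hy) c]
    split_ifs <;> omega
  | case4 a xs b ys hab hba ih =>
    intro hx hy c
    rw [mergeCommon, if_neg hab, if_pos hba,
      ih (List.Pairwise.of_cons hx) hy c]
    by_cases hca : a = c
    · subst hca
      have h0 : (b :: ys).count a = 0 := by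
        rw [List.count_eq_zero]
        intro hmem
        rw [List.pairwise_cons] at hy
        rcases List.mem_cons.mp hmem with h | h
        · exact absurd h (ne_of_gt hba)
        · exact absurd (lt_of_le_of_lt (hy.1 a h) hba) (lt_irrefl a)
      simp only [List.count_cons, h0] at *
      omega
    · simp only [List.count_cons]
      simp [hca]
  | case5 a xs b ys hab hba ih =>
    intro hx hy c
    rw [mergeCommon, if_neg hab, if_neg hba,
      ih hx (List.Pairwise.of_cons hy) c]
    by_cases hcb : b = c
    · subst hcb
      have hb : a < b := lt_of_le_of_ne (not_lt.mp hba) hab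
      have h0 : (a :: xs).count b = 0 := by
        rw [List.count_eq_zero]
        intro hmem
        rw [List.pairwise_cons] at hx
        rcases List.mem_cons.mp hmem with h | h
        · exact absurd h.symm (ne_of_lt hb)
        · exact absurd (lt_of_le_of_lt (hx.1 b h) hb) (lt_irrefl b)
      simp only [List.count_cons, h0] at *
      omega
    · simp only [List.count_cons]
      simp [hcb]

-- the two answer lists are equal: same multiset, both descending
lemma answers_eq (X Y : String) :
    ((PySem.List.sorted
        ((PySem.Set.ofList (PySem.Dict.counter X.toList).keys).inter
          (PySem.Set.ofList (PySem.Dict.counter Y.toList).keys)) id true).flatMap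
      (fun c => List.replicate (min (X.toList.count c) (Y.toList.count c)) c))
    = mergeCommon (PySem.List.sorted X.toList id true) (PySem.List.sorted Y.toList id true) := by
  set L := PySem.List.sorted
      ((PySem.Set.ofList (PySem.Dict.counter X.toList).keys).inter
        (PySem.Set.ofList (PySem.Dict.counter Y.toList).keys)) id true with hL
  have hperm := PySem.List.sorted_perm
      ((PySem.Set.ofList (PySem.Dict.counter X.toList).keys).inter
        (PySem.Set.ofList (PySem.Dict.counter Y.toList).keys)) id true
  have hnd : L.Nodup :=
    hperm.symm.nodup (PySem.Set.nodup_inter _ _ (PySem.Set.nodup_ofList _))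
  have hmemL : ∀ c : Char, c ∈ L ↔ c ∈ X.toList ∧ c ∈ Y.toList := by
    intro c
    rw [hL, PySem.List.mem_sorted, PySem.Set.mem_inter,
      PySem.Set.mem_ofList, PySem.Set.mem_ofList,
      PySem.Dict.keys_counter, PySem.Dict.keys_counter]
    simp
  have hpw : L.Pairwise (fun a b : Char => b ≤ a) := by
    have := PySem.List.sorted_pairwise_rev
        ((PySem.Set.ofList (PySem.Dict.counter X.toList).keys).inter
          (PySem.Set.ofList (PySem.Dict.counter Y.toList).keys)) id
    exact this
  have hxs := PySem.List.sorted_pairwise_rev X.toList id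
  have hys := PySem.List.sorted_pairwise_rev Y.toList id
  have hxp := PySem.List.sorted_perm X.toList id true
  have hyp := PySem.List.sorted_perm Y.toList id true
  apply List.Perm.eq_of_pairwise
    (le := fun a b : Char => b ≤ a) (fun a b _ _ h1 h2 => le_antisymm h2 h1) ?_ ?_ ?_
  · -- A's list is descending: flatMap over a nodup descending L is descending
    have hstrict : L.Pairwise (fun a b : Char => b < a) := by
      exact (hpw.and hnd).imp (fun {a b} hab => lt_of_le_of_ne hab.1 (Ne.symm hab.2))
    exact pairwise_flatMap_replicate _ L hstrict
  · exact pairwise_mergeCommon _ _ hxs hys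
  · rw [List.perm_iff_count]
    intro c
    rw [count_flatMap_replicate _ L hnd c,
      count_mergeCommon _ _ hxs hys c, hxp.count_eq, hyp.count_eq]
    by_cases hc : c ∈ L
    · simp [hc]
    · rw [if_neg hc]
      rw [hmemL, not_and_or] at hc
      rcases hc with hc | hc <;> simp [List.count_eq_zero.mpr hc]

-- ===== VERDICT =====
theorem solution_spec : Claim_equal_solution := by
  unfold Claim_equal_solution
  intro X Y _
  unfold Spec_solution solution solution_alt
  simp only [dictA_eq, PySem.Dict.getD_counter, PySem.List.foldl_append_eq_flatMap,
    List.nil_append, inner_eq, toNat_if_min]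
  rw [answers_eq X Y]
  set M := mergeCommon (PySem.List.sorted X.toList id true) (PySem.List.sorted Y.toList id true) with hM
  by_cases h1 : M = []
  · simp [h1]
  · rw [if_neg (by simpa [List.length_eq_zero_iff] using h1), if_neg h1]
    by_cases h2 : M.count '0' = M.length
    · rw [if_pos h2.symm, if_pos h2]
    · rw [if_neg (fun h => h2 h.symm), if_neg h2]
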